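-- pv_equiv track=rewrite | github.com/scikitlearn4x/scikit-learn-4x-python-lib | deployment/deploy_utils.py | major_minor_version
-- ===== SOURCE A (Python) =====
-- def major_minor_version(version):
--     result = []
--     dot_seen = 0
--
--     for ch in version:
--         if ch == '.':
--             dot_seen += 1
--             if dot_seen == 2:
--                 break
--
--         result.append(ch)
--
--     return ''.join(result)
-- ===== SOURCE B (Python) =====
-- def major_minor_version(version):
--     return '.'.join(version.split('.')[:2])
-- ===== Notes on version B (the rewrite author's own statement) =====
-- stated objective: idiomatic
-- what changed: Replaces the character-by-character scan with a dot counter and break by splitting on the separator and rejoining the first two segments.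
import Mathlib
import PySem

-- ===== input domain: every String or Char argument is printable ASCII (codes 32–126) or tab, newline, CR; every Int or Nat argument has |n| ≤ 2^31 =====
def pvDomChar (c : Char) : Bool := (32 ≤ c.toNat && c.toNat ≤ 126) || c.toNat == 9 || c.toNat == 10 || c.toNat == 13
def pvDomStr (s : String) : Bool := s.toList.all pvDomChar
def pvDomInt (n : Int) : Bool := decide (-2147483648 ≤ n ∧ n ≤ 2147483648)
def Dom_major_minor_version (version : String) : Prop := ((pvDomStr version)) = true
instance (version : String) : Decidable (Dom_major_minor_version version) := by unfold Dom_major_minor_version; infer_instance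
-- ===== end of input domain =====

-- B replaces A's character scan with a dot counter and break by split-on-'.' and rejoin of the first two segments (idiomatic decomposition, same cost).


-- ===== PORT A =====
-- the for-loop with `result`, `dot_seen` and `break`
def amvLoop (chars : List Char) (result : List Char) (dot_seen : Nat) : List Char :=
  match chars with
  | [] => result
  | ch :: rest =>
    if ch == '.' then
      if dot_seen + 1 == 2 then result
      else amvLoop rest (result ++ [ch]) (dot_seen + 1)
    else amvLoop rest (result ++ [ch]) dot_seen

def major_minor_version (version : String) : String :=
  String.ofList (amvLoop version.toList [] 0)

-- ===== PORT B =====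
-- version.split('.') with the one-char separator '.' is exactly List.splitOn '.' on the code points
def major_minor_version_alt (version : String) : String :=
  String.ofList (PySem.Chars.join ['.'] (PySem.List.slice (version.toList.splitOn '.') none (some 2)))

-- ===== PRECONDITION & SPEC =====
def Spec_major_minor_version (version : String) (out : String) : Prop := out = major_minor_version_alt version
instance (version : String) (out : String) : Decidable (Spec_major_minor_version version out) := by unfold Spec_major_minor_version; infer_instance

-- ===== CLAIM (what is proved, stated in full; the proofs are below) =====
def Claim_equal_major_minor_version : Prop := ∀ (version : String), Dom_major_minor_version version → Spec_major_minor_version version (major_minor_version version)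

-- ===== LEMMAS AND PROOFS =====

theorem amvLoop_acc (chars : List Char) (res : List Char) (d : Nat) :
    amvLoop chars res d = res ++ amvLoop chars [] d := by
  induction chars generalizing res d with
  | nil => simp [amvLoop]
  | cons c rest ih =>
    simp only [amvLoop]
    split_ifs with h1 h2
    · simp
    · rw [ih (res ++ [c]), ih ([] ++ [c])]; simp
    · rw [ih (res ++ [c]), ih ([] ++ [c])]; simp

theorem amvLoop_one (chars : List Char) :
    amvLoop chars [] 1 = chars.takeWhile (fun c => !(c == '.')) := by
  induction chars with
  | nil => simp [amvLoop]
  | cons c rest ih =>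
    by_cases hc : c = '.'
    · simp [amvLoop, hc, List.takeWhile]
    · simp only [amvLoop]
      rw [if_neg (by simpa using hc), amvLoop_acc, ih]
      simp [hc]

theorem splitOn_head_takeWhile (chars : List Char) :
    (chars.splitOn '.').take 1 = [chars.takeWhile (fun c => !(c == '.'))] := by
  induction chars with
  | nil => simp [List.splitOn, List.splitOnP_nil]
  | cons c rest ih =>
    rw [List.splitOn] at *
    rw [List.splitOnP_cons]
    by_cases hc : c = '.'
    · simp [hc, List.takeWhile]
    · rw [if_neg (by simpa using hc)]
      rcases h : rest.splitOnP (· == '.') with _ | ⟨hd, tl⟩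
      · exact absurd h (List.splitOnP_ne_nil _ rest)
      · rw [h] at ih
        simp only [List.take, List.modifyHead] at *
        simp only [List.cons.injEq] at ih
        simp [hc, ih.1]

theorem amvLoop_zero (chars : List Char) :
    amvLoop chars [] 0 = ['.'].intercalate ((chars.splitOn '.').take 2) := by
  induction chars with
  | nil => simp [amvLoop, List.splitOn, List.splitOnP_nil, List.intercalate]
  | cons c rest ih =>
    rw [List.splitOn, List.splitOnP_cons]
    by_cases hc : c = '.'
    · simp only [amvLoop, hc, beq_self_eq_true, if_true]
      rw [if_neg (by simp)]
      rw [amvLoop_acc, amvLoop_one]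
      have h1 := splitOn_head_takeWhile rest
      rw [List.splitOn] at h1
      rcases h : rest.splitOnP (· == '.') with _ | ⟨hd, tl⟩
      · exact absurd h (List.splitOnP_ne_nil _ rest)
      · rw [h] at h1
        simp only [List.take] at h1
        simp only [List.cons.injEq] at h1
        simp [List.take, List.intercalate, h1.1]
    · simp only [amvLoop]
      rw [if_neg (by simpa using hc), amvLoop_acc, ih]
      rcases h : rest.splitOnP (· == '.') with _ | ⟨hd, tl⟩
      · exact absurd h (List.splitOnP_ne_nil _ rest)
      · rw [List.splitOn, h] at *
        cases tl <;> simp [hc, List.modifyHead, List.take, List.intercalate, List.intersperse]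

-- ===== VERDICT (by name: the statement is the Claim_ definition above) =====
theorem major_minor_version_spec : Claim_equal_major_minor_version := by
  intro version _
  unfold Spec_major_minor_version major_minor_version major_minor_version_alt
  congr 1
  rw [amvLoop_zero]
  have h2 : PySem.List.slice (version.toList.splitOn '.') none (some 2)
      = (version.toList.splitOn '.').take 2 := by
    have := PySem.List.slice_to_natCast (version.toList.splitOn '.') 2
    simpa using this
  rw [h2]
  simp [PySem.Chars.join]
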